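-- pv_equiv track=rewrite | github.com/sarwarbeing-ai/Scaler | scaler/Data Structure and Algorithms Python/findpairswithminimumdistance.py | solve
-- ===== SOURCE A (Python) =====
-- def solve(A):
--     d={}
--     d[A[0]]=[0]
--     for i in range(1,len(A)):
--         if A[i] in d:
--             d[A[i]].append(i)
--         else:
--             d[A[i]]=[i]
--     mn=len(A)
--     for k in d:
--         if len(d[k])>1:
--             mn=min(abs(d[k][0]-d[k][1]),mn)
--     if mn==len(A):
--         return -1
--     return mn
-- ===== SOURCE B (Python) =====
-- def solve(A):
--     first = {}
--     for i, v in enumerate(A):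
--         first.setdefault(v, i)
--     gaps = [i - first[A[i]] for i in range(1, len(A)) if first[A[i]] < i]
--     return min(gaps) if gaps else -1
-- ===== Notes on version B (the rewrite author's own statement) =====
-- stated objective: simpler
-- what changed: Replaces the dict-of-occurrence-lists build followed by a scan over its keys with a first-occurrence-index dict plus one comprehension that collects i - first[A[i]] for every repeat occurrence and returns its min (no per-key lists, no key scan).
-- crash fix: On the empty list A raises IndexError (unconditional A[0] access) while B returns -1, the no-duplicate answer. — e.g. on solve([]): A raises IndexError, B returns -1
import Mathlib
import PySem

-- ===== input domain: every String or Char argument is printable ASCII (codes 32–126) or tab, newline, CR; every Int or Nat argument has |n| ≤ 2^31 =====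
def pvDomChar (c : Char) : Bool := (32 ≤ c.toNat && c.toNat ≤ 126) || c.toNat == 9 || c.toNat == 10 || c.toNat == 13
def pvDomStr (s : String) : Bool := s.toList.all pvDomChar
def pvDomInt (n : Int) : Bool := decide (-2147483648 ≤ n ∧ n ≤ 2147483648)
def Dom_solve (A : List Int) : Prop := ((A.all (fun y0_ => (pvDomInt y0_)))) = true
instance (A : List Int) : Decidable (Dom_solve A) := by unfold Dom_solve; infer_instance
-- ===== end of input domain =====

-- B replaces A's dict-of-occurrence-lists build plus key scan by a first-occurrence-index
-- dict and one comprehension of repeat-occurrence gaps followed by min (simpler decomposition).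


-- ===== PORT A =====
-- d[A[0]] = [0] raises IndexError on A = []; that input is excluded by Pre_solve,
-- so the port reads A[0] totally with pyGetD.
def solve (A : List Int) : Int :=
  let d0 : PySem.Dict Int (List Int) :=
    PySem.Dict.insert PySem.Dict.empty (PySem.List.pyGetD A 0 0) [0]
  let d := (PySem.List.pyRange 1 (A.length : Int) 1).foldl (fun d i =>
      if d.contains (PySem.List.pyGetD A i 0) then
        d.modify (PySem.List.pyGetD A i 0) [] (fun l => l ++ [i])
      else d.insert (PySem.List.pyGetD A i 0) [i]) d0
  let mn := (PySem.Dict.keys d).foldl (fun mn k =>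
      if 1 < (d.getD k []).length then
        min |PySem.List.pyGetD (d.getD k []) 0 0 - PySem.List.pyGetD (d.getD k []) 1 0| mn
      else mn) (A.length : Int)
  if mn = (A.length : Int) then -1 else mn

-- ===== PORT B =====
-- first = {}; for i, v in enumerate(A): first.setdefault(v, i)
-- gaps = [i - first[A[i]] for i in range(1, len(A)) if first[A[i]] < i]
-- first[A[i]] can never raise KeyError (every value is a key), so the port reads it with getD.
def solve_alt (A : List Int) : Int :=
  let first := (PySem.List.enumerate A 0).foldl
      (fun d p => d.setdefault p.2 p.1) (PySem.Dict.empty : PySem.Dict Int Int)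
  let gaps := (PySem.List.pyRange 1 (A.length : Int) 1).foldl (fun acc i =>
      if first.getD (PySem.List.pyGetD A i 0) 0 < i then
        acc ++ [i - first.getD (PySem.List.pyGetD A i 0) 0]
      else acc) []
  if gaps = [] then -1 else (PySem.List.min? gaps (fun x => x)).getD 0

-- ===== PRECONDITION & SPEC =====
-- Pre_ excludes only the empty list, on which A raises IndexError.
def Pre_solve (A : List Int) : Prop := A ≠ []
instance (A : List Int) : Decidable (Pre_solve A) := by unfold Pre_solve; infer_instance
def pvWitness_solve : List Int := [1, 2, 1, 3]

-- On the empty list A raises IndexError (unconditional A[0] access) while B returns -1.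
def Raises_solve (A : List Int) : Prop := A = []
instance (A : List Int) : Decidable (Raises_solve A) := by unfold Raises_solve; infer_instance
def pvRaiseWitness_solve : List Int := []
def pvRaiseWitnessOut_solve : Int := -1

def Spec_solve (A : List Int) (out : Int) : Prop := out = solve_alt A
instance (A : List Int) (out : Int) : Decidable (Spec_solve A out) := by unfold Spec_solve; infer_instance

-- ===== CLAIM (what is proved, stated in full; the proofs are below) =====
def Claim_equal_solve : Prop := ∀ (A : List Int), Dom_solve A → Pre_solve A → Spec_solve A (solve A)
def Claim_raises_solve : Prop := (∀ (A : List Int), Dom_solve A → Raises_solve A → ¬ Pre_solve A) ∧ (Dom_solve (pvRaiseWitness_solve) ∧ Raises_solve (pvRaiseWitness_solve) ∧ solve_alt (pvRaiseWitness_solve) = pvRaiseWitnessOut_solve)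

-- ===== LEMMAS AND PROOFS =====

def occN (A : List Int) (m : Nat) (v : Int) : List Nat :=
  (List.range m).filter (fun i => A.getD i 0 = v)
def occL (A : List Int) (m : Nat) (v : Int) : List Int :=
  (occN A m v).map (fun i => (i : Int))
def gapA (A : List Int) (v : Int) : Int :=
  (occL A A.length v).getD 1 0 - (occL A A.length v).getD 0 0

theorem mem_occN {A : List Int} {m : Nat} {v : Int} {i : Nat} :
    i ∈ occN A m v ↔ i < m ∧ A.getD i 0 = v := by
  simp [occN, List.mem_filter, List.mem_range]

theorem occN_sorted (A : List Int) (m : Nat) (v : Int) : (occN A m v).Pairwise (· < ·) :=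
  List.Pairwise.filter _ List.pairwise_lt_range

theorem occN_succ (A : List Int) (m : Nat) (v : Int) :
    occN A (m+1) v = occN A m v ++ if A.getD m 0 = v then [m] else [] := by
  simp only [occN, List.range_succ, List.filter_append, List.filter_cons, List.filter_nil]
  split_ifs <;> simp_all

theorem mem_take_iff {A : List Int} {m : Nat} {v : Int} (hm : m ≤ A.length) :
    v ∈ A.take m ↔ ∃ i, i < m ∧ A.getD i 0 = v := by
  rw [List.mem_take_iff_getElem]
  constructor
  · rintro ⟨i, hi, rfl⟩
    exact ⟨i, by omega, List.getD_eq_getElem A 0 (by omega)⟩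
  · rintro ⟨i, hi, he⟩
    have hl : i < A.length := by omega
    exact ⟨i, by omega, by rw [← List.getD_eq_getElem A 0 hl, he]⟩

theorem first_occ {A : List Int} {v : Int} (hv : v ∈ A) :
    ∃ k t, PySem.List.index? A v = some k ∧ occN A A.length v = k :: t := by
  have hs : (PySem.List.index? A v).isSome := (PySem.List.index?_isSome_iff A v).2 hv
  obtain ⟨k, hk⟩ : ∃ k, PySem.List.index? A v = some k := ⟨_, (Option.isSome_iff_exists.1 hs).choose_spec⟩
  obtain ⟨hkl, hkv, hmin⟩ := PySem.List.getElem_of_index?_eq_some hk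
  have hkmem : k ∈ occN A A.length v := mem_occN.2 ⟨hkl, by rw [List.getD_eq_getElem A 0 hkl, hkv]⟩
  obtain ⟨a, t, ht⟩ : ∃ a t, occN A A.length v = a :: t := by
    cases h : occN A A.length v with
    | nil => rw [h] at hkmem; simp at hkmem
    | cons a t => exact ⟨a, t, rfl⟩
  have hamem := mem_occN.1 (ht ▸ List.mem_cons_self (l := t))
  have hak : a ≤ k := by
    rw [ht] at hkmem
    rcases List.mem_cons.1 hkmem with h | h
    · omega
    · have := (List.pairwise_cons.1 (ht ▸ occN_sorted A A.length v)).1 k h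
      omega
  have hka : k ≤ a := by
    by_contra h
    exact hmin a (by omega) (by rw [← List.getD_eq_getElem A 0 hamem.1]; exact hamem.2)
  have : a = k := by omega
  exact ⟨k, t, hk, this ▸ ht⟩

theorem second_le {A : List Int} {v : Int} {a b : Nat} {t : List Nat}
    (h : occN A A.length v = a :: b :: t) {j : Nat} (hj : j ∈ occN A A.length v) (hja : j ≠ a) :
    b ≤ j := by
  have hp := h ▸ occN_sorted A A.length v
  rw [h] at hj
  rcases List.mem_cons.1 hj with rfl | hj
  · omega
  rcases List.mem_cons.1 hj with rfl | hj
  · omega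
  have := (List.pairwise_cons.1 (List.pairwise_cons.1 hp).2).1 j hj
  omega

theorem head_le_of_occ {A : List Int} {v : Int} {k : Nat} {t : List Nat}
    (hocc : occN A A.length v = k :: t) : ∀ i ∈ occN A A.length v, k ≤ i := by
  intro i hi
  rw [hocc] at hi
  rcases List.mem_cons.1 hi with rfl | hi
  · omega
  · have := (List.pairwise_cons.1 (hocc ▸ occN_sorted A A.length v)).1 i hi
    omega

theorem set_add_eq (s : PySem.Set Int) (x : Int) :
    PySem.Set.add s x = if x ∈ s then s else s ++ [x] := by
  simp [PySem.Set.add, PySem.Set.contains]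

theorem set_ofList_append (l : List Int) (x : Int) :
    PySem.Set.ofList (l ++ [x]) = PySem.Set.add (PySem.Set.ofList l) x := by
  simp [PySem.Set.ofList_eq_foldl, List.foldl_append]


def aStep (A : List Int) (d : PySem.Dict Int (List Int)) (i : Int) : PySem.Dict Int (List Int) :=
  if d.contains (PySem.List.pyGetD A i 0) then
    d.modify (PySem.List.pyGetD A i 0) [] (fun l => l ++ [i])
  else d.insert (PySem.List.pyGetD A i 0) [i]

def aDict (A : List Int) (m : Nat) : PySem.Dict Int (List Int) :=
  (PySem.List.pyRange 1 (m : Int) 1).foldl (aStep A)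
    (PySem.Dict.insert PySem.Dict.empty (PySem.List.pyGetD A 0 0) [0])

theorem phase1 (A : List Int) (hA : A ≠ []) :
    ∀ m : Nat, 1 ≤ m → m ≤ A.length →
    (aDict A m).keys = PySem.Set.ofList (A.take m) ∧
    ∀ v, (aDict A m).getD v [] = occL A m v := by
  intro m
  induction m with
  | zero => omega
  | succ m ih =>
    intro _ hm1
    by_cases hm : 1 ≤ m
    · -- step case
      obtain ⟨ihK, ihG⟩ := ih hm (by omega)
      have hrange : PySem.List.pyRange 1 ((m+1 : Nat) : Int) 1
          = PySem.List.pyRange 1 (m : Int) 1 ++ [(m : Int)] := by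
        push_cast
        exact PySem.List.pyRange_one_succ_right (by exact_mod_cast hm)
      have hd : aDict A (m+1) = aStep A (aDict A m) (m : Int) := by
        rw [aDict, hrange, List.foldl_append]; rfl
      have hv : PySem.List.pyGetD A ((m : Nat) : Int) 0 = A.getD m 0 :=
        PySem.List.pyGetD_natCast A m 0
      have hmlt : m < A.length := by omega
      have htake : A.take (m+1) = A.take m ++ [A.getD m 0] := by
        rw [List.take_add_one, List.getD_eq_getElem A 0 hmlt]
        simp [List.getElem?_eq_getElem hmlt]
      have hoccsucc : ∀ w, occL A (m+1) w
          = occL A m w ++ if A.getD m 0 = w then [(m : Int)] else [] := by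
        intro w
        simp only [occL, occN_succ]
        split_ifs <;> simp
      by_cases hc : (aDict A m).contains (A.getD m 0) = true
      · -- value already present: modify path
        have hstep : aDict A (m+1)
            = (aDict A m).modify (A.getD m 0) [] (fun l => l ++ [(m : Int)]) := by
          rw [hd, aStep, hv, if_pos hc]
        have hmemtake : A.getD m 0 ∈ A.take m := by
          have := (PySem.Dict.contains_iff_mem_keys _ _).1 hc
          rw [ihK] at this
          exact (PySem.Set.mem_ofList _ _).1 this
        constructor
        · rw [hstep, PySem.Dict.keys_modify,
            PySem.Dict.keys_insert_of_contains _ _ hc, ihK, htake, set_ofList_append,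
            set_add_eq, if_pos ((PySem.Set.mem_ofList _ _).2 hmemtake)]
        · intro w
          simp only [hstep, PySem.Dict.getD_modify, hoccsucc, ihG]
          split_ifs with h1 h2 h2
          · rw [h1]
          · exact absurd h1.symm h2
          · exact absurd h2.symm h1
          · simp
      · -- fresh value: insert path
        have hstep : aDict A (m+1) = (aDict A m).insert (A.getD m 0) [(m : Int)] := by
          rw [hd, aStep, hv, if_neg hc]
        have hnotmem : A.getD m 0 ∉ A.take m := by
          intro h
          exact hc ((PySem.Dict.contains_iff_mem_keys _ _).2
            (ihK ▸ (PySem.Set.mem_ofList _ _).2 h))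
        constructor
        · rw [hstep, PySem.Dict.keys_insert_of_not_contains _ _ (by simpa using hc), ihK,
            htake, set_ofList_append, set_add_eq,
            if_neg (fun h => hnotmem ((PySem.Set.mem_ofList _ _).1 h))]
        · intro w
          have hoccnil : occL A m (A.getD m 0) = [] := by
            have h0 : occN A m (A.getD m 0) = [] := by
              rw [occN, List.filter_eq_nil_iff]
              intro i hi hieq
              exact hnotmem ((mem_take_iff (by omega)).2
                ⟨i, List.mem_range.1 hi, by simpa using hieq⟩)
            show (occN A m (A.getD m 0)).map (fun i => (i : Int)) = []
            rw [h0]; rfl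
          simp only [hstep, PySem.Dict.getD_insert, hoccsucc, ihG]
          split_ifs with h1 h2 h2
          · rw [h1, hoccnil]; simp
          · exact absurd h1.symm h2
          · exact absurd h2.symm h1
          · simp
    · -- base case m+1 = 1
      have hm0 : m = 0 := by omega
      subst hm0
      obtain ⟨a, t, rfl⟩ : ∃ a t, A = a :: t := by
        cases A with
        | nil => exact absurd rfl hA
        | cons a t => exact ⟨a, t, rfl⟩
      have hd : aDict (a :: t) 1
          = PySem.Dict.insert PySem.Dict.empty a [0] := by
        rw [aDict]
        norm_num [PySem.List.pyRange_one_eq_nil, PySem.List.pyGetD_zero_cons]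
      constructor
      · rw [hd, PySem.Dict.keys_insert_of_not_contains _ _ (by simp [PySem.Dict.contains_empty])]
        simp [PySem.Dict.keys_empty]
        rfl
      · intro v
        rw [hd, PySem.Dict.getD_insert]
        have hocc : occL (a :: t) 1 v = if a = v then [(0:Int)] else [] := by
          simp only [occL, occN, List.range_succ, List.range_zero]
          split_ifs with h <;> simp_all
        rw [hocc]
        split_ifs with h1 h2 h2
        · rfl
        · exact absurd h1.symm h2
        · exact absurd h2.symm h1
        · exact (PySem.Dict.getD_empty v []).symm ▸ rfl

def gapAbs (A : List Int) (v : Int) : Int :=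
  |PySem.List.pyGetD (occL A A.length v) 0 0 - PySem.List.pyGetD (occL A A.length v) 1 0|

theorem occ_cons_cons {A : List Int} {v : Int} (hv : v ∈ A)
    (hlen : 1 < (occL A A.length v).length) :
    ∃ k b t, PySem.List.index? A v = some k ∧ occN A A.length v = k :: b :: t ∧ k < b := by
  obtain ⟨k, t, hidx, hocc⟩ := first_occ hv
  have hlN : 1 < (occN A A.length v).length := by
    simpa [occL] using hlen
  obtain ⟨b, t', rfl⟩ : ∃ b t', t = b :: t' := by
    cases t with
    | nil => rw [hocc] at hlN; simp at hlN
    | cons b t' => exact ⟨b, t', rfl⟩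
  have hkb : k < b := by
    have := hocc ▸ occN_sorted A A.length v
    exact (List.pairwise_cons.1 this).1 b (List.mem_cons_self)
  exact ⟨k, b, t', hidx, hocc, hkb⟩

theorem gap_val {A : List Int} {v : Int} {k b : Nat} {t : List Nat}
    (hocc : occN A A.length v = k :: b :: t) :
    gapA A v = (b : Int) - (k : Int) := by
  simp [gapA, occL, hocc]

theorem gapAbs_val {A : List Int} {v : Int} {k b : Nat} {t : List Nat}
    (hocc : occN A A.length v = k :: b :: t) (hkb : k < b) :
    gapAbs A v = (b : Int) - (k : Int) := by
  have hl : occL A A.length v = (k : Int) :: (b : Int) :: t.map (fun i => (i : Int)) := by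
    simp [occL, hocc]
  rw [gapAbs, hl, PySem.List.pyGetD_zero_cons]
  have h1 : PySem.List.pyGetD ((k : Int) :: (b : Int) :: t.map (fun i => (i : Int))) 1 0
      = (b : Int) := by
    have := PySem.List.pyGetD_ofNat (xs := (k : Int) :: (b : Int) :: t.map (fun i => (i : Int)))
      (n := 1) (d := 0) (by simp)
    simpa using this
  rw [h1, abs_of_nonpos (by omega)]
  ring

def aList (A : List Int) : List Int :=
  ((PySem.Set.ofList A).filter (fun v => decide (1 < (occL A A.length v).length))).map (gapA A)

def firstD (A : List Int) : PySem.Dict Int Int :=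
  (PySem.List.enumerate A 0).foldl (fun d p => d.setdefault p.2 p.1) PySem.Dict.empty

def bList (A : List Int) : List Int :=
  ((PySem.List.pyRange 1 (A.length : Int) 1).filter
      (fun i => decide ((firstD A).getD (PySem.List.pyGetD A i 0) 0 < i))).map
    (fun i => i - (firstD A).getD (PySem.List.pyGetD A i 0) 0)

theorem solve_alt_eq (A : List Int) :
    solve_alt A = if bList A = [] then -1
                  else (PySem.List.min? (bList A) (fun x => x)).getD 0 := by
  have h : (PySem.List.pyRange 1 (A.length : Int) 1).foldl (fun acc i =>
      if (firstD A).getD (PySem.List.pyGetD A i 0) 0 < i then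
        acc ++ [i - (firstD A).getD (PySem.List.pyGetD A i 0) 0]
      else acc) ([] : List Int) = bList A := by
    rw [PySem.List.foldl_append_ite
      (p := fun i => (firstD A).getD (PySem.List.pyGetD A i 0) 0 < i)
      (f := fun i => i - (firstD A).getD (PySem.List.pyGetD A i 0) 0),
      List.nil_append, bList]
  show (if (PySem.List.pyRange 1 (A.length : Int) 1).foldl (fun acc i =>
      if (firstD A).getD (PySem.List.pyGetD A i 0) 0 < i then
        acc ++ [i - (firstD A).getD (PySem.List.pyGetD A i 0) 0]
      else acc) ([] : List Int) = [] then -1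
    else (PySem.List.min? ((PySem.List.pyRange 1 (A.length : Int) 1).foldl (fun acc i =>
      if (firstD A).getD (PySem.List.pyGetD A i 0) 0 < i then
        acc ++ [i - (firstD A).getD (PySem.List.pyGetD A i 0) 0]
      else acc) ([] : List Int)) (fun x => x)).getD 0) = _
  rw [h]

theorem get?_foldl_setdefault (l : List (Int × Int)) (v : Int) :
    ∀ d : PySem.Dict Int Int,
    ((l.foldl (fun d p => d.setdefault p.2 p.1) d).get? v)
      = ((d.get? v).or ((l.find? (fun p => p.2 == v)).map Prod.fst)) := by
  induction l with
  | nil => intro d; simp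
  | cons p l ih =>
    intro d
    rw [List.foldl_cons, ih, List.find?_cons]
    by_cases hv : p.2 = v
    · subst hv
      rw [PySem.Dict.get?_setdefault_self]
      simp only [BEq.rfl]
      cases d.get? p.2 <;> simp
    · have hne : (p.2 == v) = false := by simp [hv]
      rw [hne, PySem.Dict.get?_setdefault_of_ne _ _ (fun h => hv h.symm)]

theorem find?_enumerate (A : List Int) (v : Int) :
    ∀ s : Int, (PySem.List.enumerate A s).find? (fun p => p.2 == v)
      = (PySem.List.index? A v).map (fun k => (s + (k : Int), v)) := by
  induction A with
  | nil => intro s; simp [PySem.List.enumerate]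
  | cons x xs ih =>
    intro s
    have hcons : PySem.List.enumerate (x :: xs) s
        = (s, x) :: PySem.List.enumerate xs (s + 1) := by
      simp [PySem.List.enumerate]
    rw [hcons, List.find?_cons]
    by_cases hv : x = v
    · subst hv
      simp only [BEq.rfl]
      rw [PySem.List.index?_cons_self]
      simp
    · have hne : (x == v) = false := by simp [hv]
      rw [hne, ih (s + 1), PySem.List.index?_cons_of_ne xs hv]
      cases h : PySem.List.index? xs v with
      | none => simp
      | some k => simp; ring

theorem firstD_getD {A : List Int} {v : Int} {k : Nat}
    (hidx : PySem.List.index? A v = some k) : (firstD A).getD v 0 = (k : Int) := by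
  rw [PySem.Dict.getD_eq_get?_getD, firstD, get?_foldl_setdefault _ v PySem.Dict.empty,
    find?_enumerate A v 0, hidx]
  simp

theorem first_lt_iff {A : List Int} {j k : Nat} (hj : j < A.length)
    (hidx : PySem.List.index? A (A.getD j 0) = some k) :
    (k < j ↔ A.getD j 0 ∈ A.take j) := by
  obtain ⟨k2, t, hidx', hocc⟩ := first_occ (A := A) (v := A.getD j 0)
    (by rw [List.getD_eq_getElem A 0 hj]; exact List.getElem_mem hj)
  have hkk : k2 = k := by rw [hidx'] at hidx; exact Option.some.inj hidx
  rw [hkk] at hocc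
  have hkocc : k ∈ occN A A.length (A.getD j 0) := by rw [hocc]; simp
  obtain ⟨hkn, hkv⟩ := mem_occN.1 hkocc
  constructor
  · intro hkj
    exact (mem_take_iff (by omega)).2 ⟨k, hkj, hkv⟩
  · intro hmem
    obtain ⟨i, hij, hiv⟩ := (mem_take_iff (by omega)).1 hmem
    have : k ≤ i := head_le_of_occ hocc i (mem_occN.2 ⟨by omega, hiv⟩)
    omega

theorem mem_bList {A : List Int} {y : Int} :
    y ∈ bList A ↔ ∃ j : Nat, 1 ≤ j ∧ j < A.length ∧ A.getD j 0 ∈ A.take j ∧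
      y = (j : Int) - (((PySem.List.index? A (A.getD j 0)).getD 0 : Nat) : Int) := by
  rw [bList, List.mem_map]
  constructor
  · rintro ⟨i, hi, rfl⟩
    obtain ⟨hir, hc⟩ := List.mem_filter.1 hi
    obtain ⟨hi1, hi2⟩ := PySem.List.mem_pyRange_one.1 hir
    obtain ⟨j, rfl⟩ := Int.eq_ofNat_of_zero_le (by omega : (0:Int) ≤ i)
    have hjn : j < A.length := by exact_mod_cast hi2
    rw [PySem.List.pyGetD_natCast] at hc ⊢
    obtain ⟨k, t, hidx, hocc⟩ := first_occ (A := A) (v := A.getD j 0)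
      (by rw [List.getD_eq_getElem A 0 hjn]; exact List.getElem_mem hjn)
    have hfst : (firstD A).getD (A.getD j 0) 0 = (k : Int) := firstD_getD hidx
    rw [hfst] at hc
    have hkj : k < j := by
      have := of_decide_eq_true hc
      exact_mod_cast this
    exact ⟨j, by exact_mod_cast hi1, hjn, (first_lt_iff hjn hidx).1 hkj,
      by rw [hfst, hidx]; rfl⟩
  · rintro ⟨j, hj1, hj2, hmem, rfl⟩
    obtain ⟨k, t, hidx, hocc⟩ := first_occ (A := A) (v := A.getD j 0)
      (by rw [List.getD_eq_getElem A 0 hj2]; exact List.getElem_mem hj2)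
    have hfst : (firstD A).getD (A.getD j 0) 0 = (k : Int) := firstD_getD hidx
    have hkj : k < j := (first_lt_iff hj2 hidx).2 hmem
    refine ⟨(j : Int), List.mem_filter.2 ⟨PySem.List.mem_pyRange_one.2
      ⟨by exact_mod_cast hj1, by exact_mod_cast hj2⟩, ?_⟩, ?_⟩
    · rw [PySem.List.pyGetD_natCast, hfst]
      exact decide_eq_true (by exact_mod_cast hkj)
    · rw [PySem.List.pyGetD_natCast, hfst, hidx]; rfl

theorem le_foldl_min {t : List Int} {a c : Int} (ha : c ≤ a) (ht : ∀ y ∈ t, c ≤ y) :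
    c ≤ t.foldl min a := by
  rcases PySem.List.foldl_min_mem t a with h | h
  · rw [h]; exact ha
  · exact ht _ h

theorem minfold_eq {a : Int} {L1 L2 : List Int}
    (h1 : ∀ x ∈ L1, ∃ y ∈ L2, y ≤ x) (h2 : ∀ y ∈ L2, ∃ x ∈ L1, x ≤ y) :
    L1.foldl min a = L2.foldl min a := by
  apply le_antisymm
  · refine le_foldl_min (PySem.List.foldl_min_le L1 a).1 (fun y hy => ?_)
    obtain ⟨x, hx, hxy⟩ := h2 y hy
    exact le_trans ((PySem.List.foldl_min_le L1 a).2 x hx) hxy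
  · refine le_foldl_min (PySem.List.foldl_min_le L2 a).1 (fun x hx => ?_)
    obtain ⟨y, hy, hyx⟩ := h1 x hx
    exact le_trans ((PySem.List.foldl_min_le L2 a).2 y hy) hyx

theorem solve_eq (A : List Int) (hA : A ≠ []) :
    solve A = if (aList A).foldl min (A.length : Int) = (A.length : Int) then -1
              else (aList A).foldl min (A.length : Int) := by
  have hlen : 1 ≤ A.length := by
    cases A with
    | nil => exact absurd rfl hA
    | cons a t => simp
  obtain ⟨hK, hG⟩ := phase1 A hA A.length hlen le_rfl
  have hfold : ((aDict A A.length).keys).foldl (fun mn k =>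
        if 1 < ((aDict A A.length).getD k []).length then
          min |PySem.List.pyGetD ((aDict A A.length).getD k []) 0 0 -
               PySem.List.pyGetD ((aDict A A.length).getD k []) 1 0| mn
        else mn) (A.length : Int)
      = (aList A).foldl min (A.length : Int) := by
    simp only [hG]
    rw [hK, List.take_length]
    rw [PySem.List.foldl_congr_mem (PySem.Set.ofList A) _
      (fun mn k => if 1 < (occL A A.length k).length then min (gapA A k) mn else mn) _
      (fun acc k hk => ?_)]
    · rw [PySem.List.foldl_ite_eq_foldl_filter
        (p := fun k => 1 < (occL A A.length k).length)
        (f := fun mn k => min (gapA A k) mn)]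
      rw [aList, List.foldl_map]
      exact PySem.List.foldl_congr_mem _ _ _ _ (fun acc x _ => min_comm (gapA A x) acc)
    · show (if 1 < (occL A A.length k).length then min (gapAbs A k) acc else acc)
          = if 1 < (occL A A.length k).length then min (gapA A k) acc else acc
      by_cases h : 1 < (occL A A.length k).length
      · rw [if_pos h, if_pos h]
        obtain ⟨k', b, t, hidx, hocc, hkb⟩ :=
          occ_cons_cons ((PySem.Set.mem_ofList A k).1 hk) h
        rw [gapAbs_val hocc hkb, gap_val hocc]
      · rw [if_neg h, if_neg h]
  have hsolve : solve A =
      (if ((aDict A A.length).keys).foldl (fun mn k =>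
            if 1 < ((aDict A A.length).getD k []).length then
              min |PySem.List.pyGetD ((aDict A A.length).getD k []) 0 0 -
                   PySem.List.pyGetD ((aDict A A.length).getD k []) 1 0| mn
            else mn) (A.length : Int) = (A.length : Int) then -1
       else ((aDict A A.length).keys).foldl (fun mn k =>
            if 1 < ((aDict A A.length).getD k []).length then
              min |PySem.List.pyGetD ((aDict A A.length).getD k []) 0 0 -
                   PySem.List.pyGetD ((aDict A A.length).getD k []) 1 0| mn
            else mn) (A.length : Int)) := rfl
  rw [hsolve, hfold]

theorem mem_aList {A : List Int} {x : Int} :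
    x ∈ aList A ↔ ∃ v, v ∈ A ∧ 1 < (occL A A.length v).length ∧ x = gapA A v := by
  rw [aList, List.mem_map]
  constructor
  · rintro ⟨v, hv, rfl⟩
    obtain ⟨h1, h2⟩ := List.mem_filter.1 hv
    exact ⟨v, (PySem.Set.mem_ofList A v).1 h1, by simpa using h2, rfl⟩
  · rintro ⟨v, hv, hl, rfl⟩
    exact ⟨v, List.mem_filter.2 ⟨(PySem.Set.mem_ofList A v).2 hv, by simpa using hl⟩, rfl⟩

theorem aList_sub (A : List Int) : ∀ x ∈ aList A, x ∈ bList A := by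
  intro x hx
  obtain ⟨v, hvA, hlen, rfl⟩ := mem_aList.1 hx
  obtain ⟨k, b, t, hidx, hocc, hkb⟩ := occ_cons_cons hvA hlen
  have hbocc : b ∈ occN A A.length v := by rw [hocc]; simp
  have hkocc : k ∈ occN A A.length v := by rw [hocc]; simp
  obtain ⟨hbn, hbv⟩ := mem_occN.1 hbocc
  obtain ⟨hkn, hkv⟩ := mem_occN.1 hkocc
  refine mem_bList.2 ⟨b, by omega, hbn, ?_, ?_⟩
  · rw [hbv]
    exact (mem_take_iff (by omega)).2 ⟨k, hkb, hkv⟩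
  · rw [hbv, hidx, gap_val hocc]
    rfl

theorem bList_dom (A : List Int) : ∀ y ∈ bList A, ∃ x ∈ aList A, x ≤ y := by
  intro y hy
  obtain ⟨j, hj1, hjn, hjtake, rfl⟩ := mem_bList.1 hy
  have hvA : A.getD j 0 ∈ A := by
    rw [List.getD_eq_getElem A 0 hjn]
    exact List.getElem_mem hjn
  obtain ⟨k, t, hidx, hocc⟩ := first_occ hvA
  have hjocc : j ∈ occN A A.length (A.getD j 0) := mem_occN.2 ⟨hjn, rfl⟩
  -- k < j because some occurrence lies in A.take j
  obtain ⟨i, hij, hiv⟩ := (mem_take_iff (by omega)).1 hjtake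
  have hiocc : i ∈ occN A A.length (A.getD j 0) := mem_occN.2 ⟨by omega, hiv⟩
  have hki : k ≤ i := head_le_of_occ hocc i hiocc
  have hkj : k < j := by omega
  obtain ⟨b, t', rfl⟩ : ∃ b t', t = b :: t' := by
    cases t with
    | nil =>
      rw [hocc] at hjocc
      rcases List.mem_cons.1 hjocc with h | h
      · omega
      · simp at h
    | cons b t' => exact ⟨b, t', rfl⟩
  have hbj : b ≤ j := second_le hocc hjocc (by omega)
  have hkb : k < b := (List.pairwise_cons.1 (hocc ▸ occN_sorted A A.length _)).1 b (by simp)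
  refine ⟨gapA A (A.getD j 0), mem_aList.2 ⟨A.getD j 0, hvA, by
    show 1 < ((occN A A.length (A.getD j 0)).map (fun i => (i : Int))).length
    rw [List.length_map, hocc]; simp, rfl⟩, ?_⟩
  rw [gap_val hocc, hidx]
  show (b : Int) - (k : Int) ≤ (j : Int) - ((k : Nat) : Int)
  omega

theorem bList_lt (A : List Int) : ∀ y ∈ bList A, y < (A.length : Int) := by
  intro y hy
  obtain ⟨j, hj1, hjn, hjtake, rfl⟩ := mem_bList.1 hy
  have : (0 : Int) ≤ (((PySem.List.index? A (A.getD j 0)).getD 0 : Nat) : Int) := by positivity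
  omega


theorem solve_spec' (A : List Int) (hA : A ≠ []) : solve A = solve_alt A := by
  rw [solve_eq A hA, solve_alt_eq A]
  have hdom : (aList A).foldl min (A.length : Int) = (bList A).foldl min (A.length : Int) :=
    minfold_eq (fun x hx => ⟨x, aList_sub A x hx, le_refl x⟩) (bList_dom A)
  by_cases hb : bList A = []
  · have ha : aList A = [] := by
      cases h : aList A with
      | nil => rfl
      | cons x xs =>
        have := aList_sub A x (h ▸ List.mem_cons_self)
        rw [hb] at this
        simp at this
    rw [ha, hb]
    simp
  · obtain ⟨g, t, hgt⟩ : ∃ g t, bList A = g :: t := by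
      cases h : bList A with
      | nil => exact absurd h hb
      | cons g t => exact ⟨g, t, rfl⟩
    have hg : g < (A.length : Int) := bList_lt A g (hgt ▸ List.mem_cons_self)
    have hfold : (bList A).foldl min (A.length : Int) = t.foldl min g := by
      rw [hgt, List.foldl_cons, min_eq_right (le_of_lt hg)]
    have hlt : t.foldl min g < (A.length : Int) :=
      lt_of_le_of_lt (PySem.List.foldl_min_le t g).1 hg
    rw [hdom, hfold, if_neg (by omega), hgt, if_neg (by simp),
      PySem.List.min?_id_cons]
    rfl

-- ===== VERDICT (by name: the statement is the Claim_ definition above) =====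
theorem solve_spec : Claim_equal_solve := by
  intro A _ hA
  unfold Spec_solve
  exact solve_spec' A hA

def solve_raises : Claim_raises_solve := by
  unfold Claim_raises_solve
  exact ⟨fun A _ h hp => hp h, by decide⟩
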